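-- pv_equiv track=rewrite | github.com/IBM/graph2tac | tests/propchain_large/gen.py | get_fname
-- ===== SOURCE A (Python) =====
-- def get_fname(i: int,
--                 degree: int,
--                 prefix: str):
--
--     def char_of_level(level: int) -> str:
--         return chr(ord('a') + level)
--     digits = []
--     while (i != 0):
--         d = i % degree;
--         digits.append(d)
--         i = i // degree
--     digits.reverse()
--     return prefix + '/' + '/'.join([f"{char_of_level(level)}{d}" for level, d in enumerate(digits)])
-- ===== SOURCE B (Python) =====
-- def get_fname(i: int,
--                 degree: int,
--                 prefix: str):
--
--     def go(n: int):
--         # returns (joined path of the digits of n, number of digits)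
--         if n == 0:
--             return ("", 0)
--         s, k = go(n // degree)
--         seg = chr(ord('a') + k) + str(n % degree)
--         return (seg if s == "" else s + "/" + seg, k + 1)
--
--     return prefix + "/" + go(i)[0]
-- ===== Notes on version B (the rewrite author's own statement) =====
-- stated objective: alternative
-- what changed: Instead of collecting digits into a list, reversing it, and formatting with enumerate+join, B uses one recursive helper that builds the joined 'letter+digit' path string directly top-down while counting levels, so the digit list, the reverse, enumerate and join all disappear.
import Mathlib
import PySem

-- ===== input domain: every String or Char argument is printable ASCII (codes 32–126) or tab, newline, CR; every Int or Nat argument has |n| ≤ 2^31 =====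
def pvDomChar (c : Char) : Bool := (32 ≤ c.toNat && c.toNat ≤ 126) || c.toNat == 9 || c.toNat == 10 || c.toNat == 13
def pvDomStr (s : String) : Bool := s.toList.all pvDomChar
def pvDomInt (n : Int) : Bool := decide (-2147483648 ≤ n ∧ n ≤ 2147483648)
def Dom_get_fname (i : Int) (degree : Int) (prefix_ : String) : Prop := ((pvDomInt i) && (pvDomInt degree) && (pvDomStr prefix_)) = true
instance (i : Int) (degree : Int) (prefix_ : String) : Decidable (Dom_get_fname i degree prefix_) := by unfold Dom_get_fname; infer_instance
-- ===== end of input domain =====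

-- B replaces A's digit list + reverse + enumerate/join formatting by one recursion that builds the
-- joined path string directly while counting levels (alternative decomposition; same cost).
-- Both ports run the digit recursion on a fuel of i.natAbs + 2; inside Pre_ (where the Python
-- loop/recursion terminates) strictly fewer steps are used, so the ports are exact there.

-- ===== PORT A =====
-- the nested char_of_level
def get_fname_char_of_level (level : Int) : String := String.ofList [Char.ofNat (97 + level.toNat)]

-- 'while i != 0: d = i % degree; digits.append(d); i = i // degree'
def get_fname_loop (degree : Int) : Nat → Int → List Int → List Int
  | 0, _, digits => digits
  | fuel+1, i, digits =>
      if i ≠ 0 then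
        get_fname_loop degree fuel (PySem.Int.floordiv i degree) (digits ++ [PySem.Int.mod i degree])
      else digits

def get_fname (i : Int) (degree : Int) (prefix_ : String) : String :=
  let digits := (get_fname_loop degree (i.natAbs + 2) i []).reverse
  prefix_ ++ "/" ++ PySem.Str.join "/"
    ((PySem.List.enumerate digits 0).map
      (fun p => get_fname_char_of_level p.1 ++ PySem.Int.toStr p.2))

-- ===== PORT B =====
-- 'def go(n): ... returns (joined path of the digits of n, number of digits)'
def get_fname_alt_go (degree : Int) : Nat → Int → String × Int
  | 0, _ => ("", 0)
  | fuel+1, n =>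
      if n = 0 then ("", 0)
      else
        let sk := get_fname_alt_go degree fuel (PySem.Int.floordiv n degree)
        let seg := String.ofList [Char.ofNat (97 + sk.2.toNat)] ++ PySem.Int.toStr (PySem.Int.mod n degree)
        (if sk.1 = "" then seg else sk.1 ++ "/" ++ seg, sk.2 + 1)

def get_fname_alt (i : Int) (degree : Int) (prefix_ : String) : String :=
  prefix_ ++ "/" ++ (get_fname_alt_go degree (i.natAbs + 2) i).1

-- ===== PRECONDITION & SPEC =====
-- Pre_ = exactly the inputs on which the Python A terminates normally: A raises ZeroDivisionError for
-- degree = 0 with i ≠ 0, and loops forever for degree = 1 or -1 with i ≠ 0 and for degree ≥ 2 with i < 0.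
def Pre_get_fname (i : Int) (degree : Int) (prefix_ : String) : Prop :=
  i = 0 ∨ (2 ≤ degree ∧ 0 ≤ i) ∨ degree ≤ -2
instance (i : Int) (degree : Int) (prefix_ : String) : Decidable (Pre_get_fname i degree prefix_) := by unfold Pre_get_fname; infer_instance
def pvWitness_get_fname : Int × Int × String := (37, 2, "pre")

def Spec_get_fname (i : Int) (degree : Int) (prefix_ : String) (out : String) : Prop := out = get_fname_alt i degree prefix_
instance (i : Int) (degree : Int) (prefix_ : String) (out : String) : Decidable (Spec_get_fname i degree prefix_ out) := by unfold Spec_get_fname; infer_instance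

-- ===== CLAIM (what is proved, stated in full; the proofs are below) =====
def Claim_equal_get_fname : Prop := ∀ (i : Int) (degree : Int) (prefix_ : String), Dom_get_fname i degree prefix_ → Pre_get_fname i degree prefix_ → Spec_get_fname i degree prefix_ (get_fname i degree prefix_)

-- ===== LEMMAS AND PROOFS =====

-- A's formatting of a most-significant-first digit list, as a function (proof helper)
def pvRender (xs : List Int) : String :=
  PySem.Str.join "/" ((PySem.List.enumerate xs 0).map
    (fun p => get_fname_char_of_level p.1 ++ PySem.Int.toStr p.2))

-- most-significant-first digits by fuelled recursion (proof helper)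
def pvDigits (degree : Int) : Nat → Int → List Int
  | 0, _ => []
  | fuel+1, n =>
      if n = 0 then []
      else pvDigits degree fuel (PySem.Int.floordiv n degree) ++ [PySem.Int.mod n degree]

-- A's loop only ever appends to its accumulator
theorem get_fname_loop_acc (degree : Int) (fuel : Nat) :
    ∀ (i : Int) (acc : List Int),
      get_fname_loop degree fuel i acc = acc ++ get_fname_loop degree fuel i [] := by
  induction fuel with
  | zero => intro i acc; simp [get_fname_loop]
  | succ f ih =>
      intro i acc
      by_cases h : i = 0
      · simp [get_fname_loop, h]
      · simp only [get_fname_loop, if_pos h, ne_eq]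
        simp only [List.nil_append]
        rw [ih (PySem.Int.floordiv i degree) (acc ++ [PySem.Int.mod i degree]),
            ih (PySem.Int.floordiv i degree) ([PySem.Int.mod i degree])]
        simp

-- with equal fuel, A's reversed loop output is the most-significant-first digit list
theorem digits_eq (degree : Int) (fuel : Nat) :
    ∀ (i : Int), (get_fname_loop degree fuel i []).reverse = pvDigits degree fuel i := by
  induction fuel with
  | zero => intro i; simp [get_fname_loop, pvDigits]
  | succ f ih =>
      intro i
      by_cases h : i = 0
      · simp [get_fname_loop, pvDigits, h]
      · simp only [get_fname_loop, pvDigits, if_pos h, if_neg h]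
        simp only [List.nil_append]
        rw [get_fname_loop_acc degree f (PySem.Int.floordiv i degree) [PySem.Int.mod i degree]]
        simp [ih (PySem.Int.floordiv i degree)]

theorem sj_nil (sep : String) : PySem.Str.join sep [] = "" := by
  simp [PySem.Str.join, PySem.Chars.join_nil]

theorem sj_singleton (sep x : String) : PySem.Str.join sep [x] = x := by
  simp [PySem.Str.join, PySem.Chars.join_singleton]

theorem sj_cons_cons (sep a b : String) (t : List String) :
    PySem.Str.join sep (a :: b :: t) = a ++ sep ++ PySem.Str.join sep (b :: t) := by
  simp [PySem.Str.join, PySem.Chars.join_cons_cons, String.append_assoc]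

theorem join_append_singleton (sep x : String) :
    ∀ (l : List String), PySem.Str.join sep (l ++ [x]) =
      if l = [] then x else PySem.Str.join sep l ++ sep ++ x := by
  intro l
  induction l with
  | nil => simp [sj_singleton]
  | cons a t ih =>
      cases t with
      | nil => simp [sj_cons_cons, sj_singleton]
      | cons b u =>
          simp only [List.cons_append, sj_cons_cons]
          rw [show b :: (u ++ [x]) = (b :: u) ++ [x] from rfl, ih]
          simp [String.append_assoc]

theorem pvRender_append (xs : List Int) (d : Int) :
    pvRender (xs ++ [d]) =
      if xs = [] then get_fname_char_of_level xs.length ++ PySem.Int.toStr d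
      else pvRender xs ++ "/" ++ (get_fname_char_of_level xs.length ++ PySem.Int.toStr d) := by
  unfold pvRender
  rw [PySem.List.enumerate_append]
  simp only [List.map_append, PySem.List.enumerate_cons, PySem.List.enumerate_nil, List.map_cons,
    List.map_nil, join_append_singleton]
  by_cases h : xs = []
  · simp [h, PySem.List.enumerate_nil]
  · have : (PySem.List.enumerate xs 0).map
        (fun p => get_fname_char_of_level p.1 ++ PySem.Int.toStr p.2) ≠ [] := by
      cases xs with
      | nil => exact absurd rfl h
      | cons a t => simp [PySem.List.enumerate_cons]
    simp [this, h]

theorem pvRender_ne_empty (xs : List Int) (h : xs ≠ []) : pvRender xs ≠ "" := by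
  cases xs with
  | nil => exact absurd rfl h
  | cons y t =>
      unfold pvRender
      cases t with
      | nil =>
          simp only [PySem.List.enumerate_cons, PySem.List.enumerate_nil, List.map_cons, List.map_nil,
            sj_singleton]
          intro he
          have := congrArg String.toList he
          simp [get_fname_char_of_level] at this
      | cons b u =>
          simp only [PySem.List.enumerate_cons, List.map_cons, sj_cons_cons]
          intro he
          have := congrArg String.toList he
          simp [get_fname_char_of_level, String.toList_append] at this

-- B's recursion computes A's formatted string of the digit list, together with its length
theorem go_eq (degree : Int) (fuel : Nat) :
    ∀ (n : Int), get_fname_alt_go degree fuel n =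
      (pvRender (pvDigits degree fuel n), ((pvDigits degree fuel n).length : Int)) := by
  induction fuel with
  | zero => intro n; simp [get_fname_alt_go, pvDigits, pvRender, PySem.List.enumerate_nil, sj_nil]
  | succ f ih =>
      intro n
      by_cases h : n = 0
      · simp [get_fname_alt_go, pvDigits, h, pvRender, PySem.List.enumerate_nil, sj_nil]
      · simp only [get_fname_alt_go, pvDigits, if_neg h, ih]
        rw [pvRender_append]
        by_cases he : pvDigits degree f (PySem.Int.floordiv n degree) = []
        · simp [he, pvRender, PySem.List.enumerate_nil, sj_nil, get_fname_char_of_level]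
        · have hne := pvRender_ne_empty _ he
          simp [he, hne, get_fname_char_of_level]

-- ===== VERDICT (by name: the statement is the Claim_ definition above) =====
theorem get_fname_spec : Claim_equal_get_fname := by
  intro i degree prefix_ _ _
  show _ = _
  unfold get_fname get_fname_alt
  rw [go_eq degree (i.natAbs + 2) i, digits_eq degree (i.natAbs + 2) i]
  rfl
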